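-- pv_equiv track=rewrite | github.com/Yan-Zhelanov/algorithms | sprint_8/1_issues/g_search_with_shift.py | find_pattern_positions
-- ===== SOURCE A (Python) =====
-- def find_pattern_positions(temperatures, pattern, start=0):
--     if len(temperatures) == 0 or len(pattern) == 0:
--         return ''
--     temperatures = list(map(int, temperatures))
--     pattern = list(map(int, pattern))
--     positions = []
--     for position in range(start, len(temperatures)-len(pattern)+1):
--         match = True
--         for offset in range(1, len(pattern)):
--             if temperatures[position+offset]-temperatures[position+offset-1] != pattern[offset]-pattern[offset-1]:
--                 match = False
--                 break
--         if match:
--             positions.append(position+1)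
--     return ' '.join(str(position) for position in positions)
-- ===== SOURCE B (Python) =====
-- def find_pattern_positions(temperatures, pattern, start=0):
--     if len(temperatures) == 0 or len(pattern) == 0:
--         return ''
--     temperatures = list(map(int, temperatures))
--     pattern = list(map(int, pattern))
--     dt = [b - a for a, b in zip(temperatures, temperatures[1:])]
--     dp = [b - a for a, b in zip(pattern, pattern[1:])]
--     k = len(dp)
--     if k == 0:
--         return ' '.join(str(i + 1) for i in range(start, len(temperatures)))
--     # KMP failure function over the pattern's difference sequence
--     fail = [0] * k
--     q = 0
--     for j in range(1, k):
--         while q > 0 and dp[j] != dp[q]: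
--             q = fail[q - 1]
--         if dp[j] == dp[q]:
--             q += 1
--         fail[j] = q
--     # KMP scan of the temperature difference sequence
--     res = []
--     q = 0
--     for j, d in enumerate(dt):
--         while q > 0 and d != dp[q]:
--             q = fail[q - 1]
--         if d == dp[q]:
--             q += 1
--         if q == k:
--             if j - k + 1 >= start:
--                 res.append(str(j - k + 2))
--             q = fail[k - 1]
--     return ' '.join(res)
-- ===== Notes on version B (the rewrite author's own statement) =====
-- stated objective: alternative
-- what changed: A's nested scan (for every start position re-compare all consecutive differences, breaking on the first mismatch) is replaced by Knuth-Morris-Pratt string matching of the pattern's difference sequence against the temperature difference sequence: a precomputed failure function and a single left-to-right scan that never re-reads a text element.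
-- outside the precondition, e.g. on find_pattern_positions([1, 2, 10, 11], [5, 6], -4): A returns '-3 -1 1 3', B returns '1 3'
import Mathlib
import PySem

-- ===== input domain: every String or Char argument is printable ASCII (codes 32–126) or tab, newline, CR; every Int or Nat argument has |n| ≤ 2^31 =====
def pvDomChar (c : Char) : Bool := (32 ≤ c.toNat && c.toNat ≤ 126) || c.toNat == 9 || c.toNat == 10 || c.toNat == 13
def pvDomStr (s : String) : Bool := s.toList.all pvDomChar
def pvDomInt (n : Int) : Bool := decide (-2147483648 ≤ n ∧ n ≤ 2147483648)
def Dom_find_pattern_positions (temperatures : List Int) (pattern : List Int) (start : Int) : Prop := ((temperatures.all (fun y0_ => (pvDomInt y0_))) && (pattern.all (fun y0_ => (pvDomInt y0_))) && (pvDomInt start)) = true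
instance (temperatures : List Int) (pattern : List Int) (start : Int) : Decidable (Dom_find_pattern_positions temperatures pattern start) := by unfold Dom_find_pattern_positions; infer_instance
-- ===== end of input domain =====

-- B replaces A's nested scan (every start position re-compares all consecutive
-- differences) by Knuth–Morris–Pratt matching of the pattern's difference sequence
-- against the temperature difference sequence: failure function + one left-to-right scan.

-- ===== PORT A =====
-- inner 'for offset in range(1, len(pattern))' with break: false on first mismatch
def pvAInner (temperatures pattern : List Int) (position : Int) : List Int → Bool
  | [] => true
  | offset :: rest =>
    if PySem.List.pyGetD temperatures (position + offset) 0
         - PySem.List.pyGetD temperatures (position + offset - 1) 0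
       ≠ PySem.List.pyGetD pattern offset 0 - PySem.List.pyGetD pattern (offset - 1) 0
    then false
    else pvAInner temperatures pattern position rest

def find_pattern_positions (temperatures : List Int) (pattern : List Int) (start : Int) : String :=
  if temperatures.length = 0 ∨ pattern.length = 0 then "" else
  let positions : List Int :=
    (PySem.List.pyRange start ((temperatures.length : Int) - (pattern.length : Int) + 1) 1).foldl
      (fun acc position =>
        if pvAInner temperatures pattern position (PySem.List.pyRange 1 (pattern.length : Int) 1)
        then acc ++ [position + 1] else acc) []
  PySem.Str.join " " (positions.map PySem.Int.toStr)

-- ===== PORT B =====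
-- [b - a for a, b in zip(xs, xs[1:])]
def pvDiffs (xs : List Int) : List Int :=
  (xs.zip (PySem.List.slice xs (some 1) none)).map (fun ab => ab.2 - ab.1)

-- 'while q > 0 and d != dp[q]: q = fail[q-1]' — fuel-based (fuel = initial q suffices,
-- since the verified failure table satisfies fail[q-1] < q; the fuel only makes it total)
def pvWhileB (dp : List Int) (fail : List Nat) (d : Int) : Nat → Nat → Nat
  | 0, q => q
  | fuel+1, q =>
    if 0 < q ∧ d ≠ dp.getD q 0 then pvWhileB dp fail d fuel (fail.getD (q-1) 0) else q

-- the shared 'while … ; if d == dp[q]: q += 1' step of Source B's helper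
def pvStepB (dp : List Int) (fail : List Nat) (d : Int) (q : Nat) : Nat :=
  let q' := pvWhileB dp fail d q q
  if d = dp.getD q' 0 then q' + 1 else q'

-- 'fail = [0]*k; q = 0; for j in range(1, k): …'
def pvBuildFail (dp : List Int) (k : Nat) : List Nat × Nat :=
  (List.range' 1 (k-1)).foldl
    (fun st j =>
      let q1 := pvStepB dp st.1 (dp.getD j 0) st.2
      (st.1.set j q1, q1))
    (List.replicate k 0, 0)

-- 'res = []; q = 0; for j, d in enumerate(dt): …'
def pvScan (dp : List Int) (fail : List Nat) (k : Nat) (start : Int) (dt : List Int) : List String :=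
  ((PySem.List.enumerate dt 0).foldl
    (fun st jd =>
      let q1 := pvStepB dp fail jd.2 st.2
      if q1 = k then
        (if start ≤ jd.1 - (k : Int) + 1 then st.1 ++ [PySem.Int.toStr (jd.1 - (k : Int) + 2)] else st.1,
         fail.getD (k-1) 0)
      else (st.1, q1))
    ([], 0)).1

def find_pattern_positions_alt (temperatures : List Int) (pattern : List Int) (start : Int) : String :=
  if temperatures.length = 0 ∨ pattern.length = 0 then "" else
  let dt := pvDiffs temperatures
  let dp := pvDiffs pattern
  let k := dp.length
  if k = 0 then
    PySem.Str.join " " ((PySem.List.pyRange start (temperatures.length : Int) 1).map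
      (fun i => PySem.Int.toStr (i + 1)))
  else
    let fq := pvBuildFail dp k
    PySem.Str.join " " (pvScan dp fq.1 k start dt)

-- ===== PRECONDITION & SPEC =====
-- Pre_ excludes negative start: there A's position range and list indices wrap around
-- Python-style, raising IndexError for start < -len(temperatures) and otherwise returning
-- accidental wraparound matches and non-positive positions.
def Pre_find_pattern_positions (temperatures : List Int) (pattern : List Int) (start : Int) : Prop :=
  0 ≤ start
instance (temperatures : List Int) (pattern : List Int) (start : Int) : Decidable (Pre_find_pattern_positions temperatures pattern start) := by unfold Pre_find_pattern_positions; infer_instance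

def pvWitness_find_pattern_positions : List Int × List Int × Int := ([1, 2, 3], [1, 2], 0)

def Spec_find_pattern_positions (temperatures : List Int) (pattern : List Int) (start : Int) (out : String) : Prop := out = find_pattern_positions_alt temperatures pattern start
instance (temperatures : List Int) (pattern : List Int) (start : Int) (out : String) : Decidable (Spec_find_pattern_positions temperatures pattern start out) := by unfold Spec_find_pattern_positions; infer_instance

-- ===== CLAIM (what is proved, stated in full; the proofs are below) =====
def Claim_equal_find_pattern_positions : Prop := ∀ (temperatures : List Int) (pattern : List Int) (start : Int), Dom_find_pattern_positions temperatures pattern start → Pre_find_pattern_positions temperatures pattern start → Spec_find_pattern_positions temperatures pattern start (find_pattern_positions temperatures pattern start)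

-- ===== LEMMAS AND PROOFS =====

-- -- A-side characterization --

lemma pvDiffs_length (xs : List Int) : (pvDiffs xs).length = xs.length - 1 := by
  simp [pvDiffs, PySem.List.slice_from_one]

lemma pvDiffs_getElem (xs : List Int) (j : Nat) (h : j < (pvDiffs xs).length) :
    (pvDiffs xs)[j] = xs[j + 1]'(by rw [pvDiffs_length] at h; omega)
      - xs[j]'(by rw [pvDiffs_length] at h; omega) := by
  simp [pvDiffs, PySem.List.slice_from_one, List.getElem_zip, List.getElem_tail]

-- pvAInner (loop with break) as an 'all' over the offset list
lemma pvAInner_eq_all (t p : List Int) (pos : Int) (L : List Int) :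
    pvAInner t p pos L
      = L.all (fun o => decide (PySem.List.pyGetD t (pos + o) 0 - PySem.List.pyGetD t (pos + o - 1) 0
          = PySem.List.pyGetD p o 0 - PySem.List.pyGetD p (o - 1) 0)) := by
  induction L with
  | nil => rfl
  | cons o rest ih =>
    by_cases h : PySem.List.pyGetD t (pos + o) 0 - PySem.List.pyGetD t (pos + o - 1) 0
        = PySem.List.pyGetD p o 0 - PySem.List.pyGetD p (o - 1) 0
    · simp [pvAInner, h, ih]
    · simp [pvAInner, h]

-- the single difference comparison of A, at a Nat position/offset, as a getElem fact
lemma pvStep (t p : List Int) (i' j : Nat) (hm : j + 1 < p.length) (ht : i' + p.length ≤ t.length) :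
    (PySem.List.pyGetD t ((i' : Int) + ((j : Int) + 1)) 0
        - PySem.List.pyGetD t ((i' : Int) + ((j : Int) + 1) - 1) 0
      = PySem.List.pyGetD p ((j : Int) + 1) 0 - PySem.List.pyGetD p ((j : Int) + 1 - 1) 0)
    ↔ (t[i' + j + 1]'(by omega) - t[i' + j]'(by omega)
        = p[j + 1]'(by omega) - p[j]'(by omega)) := by
  have e1 : ((i' : Int) + ((j : Int) + 1)) = ((i' + j + 1 : Nat) : Int) := by push_cast; ring
  have e2 : ((i' : Int) + ((j : Int) + 1) - 1) = ((i' + j : Nat) : Int) := by push_cast; ring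
  have e3 : ((j : Int) + 1) = ((j + 1 : Nat) : Int) := by push_cast; ring
  have e4 : ((j : Int) + 1 - 1) = ((j : Nat) : Int) := by ring
  rw [e2, e1, e4, e3, PySem.List.pyGetD_natCast, PySem.List.pyGetD_natCast,
      PySem.List.pyGetD_natCast, PySem.List.pyGetD_natCast,
      List.getD_eq_getElem t 0 (by omega), List.getD_eq_getElem t 0 (by omega),
      List.getD_eq_getElem p 0 (by omega), List.getD_eq_getElem p 0 (by omega)]

-- the core: per-position match test of A equals sublist comparison on difference arrays
lemma pvCore (t p : List Int) (i : Int) (hi : 0 ≤ i)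
    (hub : i + (p.length : Int) ≤ (t.length : Int)) (hp : p ≠ []) :
    pvAInner t p i (PySem.List.pyRange 1 (p.length : Int) 1)
      = (PySem.List.slice (pvDiffs t) (some i) (some (i + ((pvDiffs p).length : Int))) == pvDiffs p) := by
  obtain ⟨i', rfl⟩ : ∃ i' : Nat, i = (i' : Int) := ⟨i.toNat, (Int.toNat_of_nonneg hi).symm⟩
  have hm : 1 ≤ p.length := List.length_pos_iff.mpr hp
  have hub' : i' + p.length ≤ t.length := by exact_mod_cast hub
  rw [pvAInner_eq_all, PySem.List.slice_natCast_add, Bool.eq_iff_iff,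
      List.all_eq_true, beq_iff_eq]
  constructor
  · intro hall
    apply List.ext_getElem
    · simp only [List.length_take, List.length_drop, pvDiffs_length]; omega
    · intro j hj1 hj2
      have hjk : j < p.length - 1 := by rwa [pvDiffs_length] at hj2
      rw [List.getElem_take, List.getElem_drop, pvDiffs_getElem, pvDiffs_getElem]
      have hmem : ((j : Int) + 1) ∈ PySem.List.pyRange 1 (p.length : Int) 1 :=
        PySem.List.mem_pyRange_one.mpr (by constructor <;> [omega; (push_cast; omega)])
      have := hall _ hmem
      rw [decide_eq_true_eq] at this
      exact (pvStep t p i' j (by omega) hub').mp this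
  · intro heq o hmem
    rw [decide_eq_true_eq]
    rw [PySem.List.mem_pyRange_one] at hmem
    obtain ⟨j, rfl⟩ : ∃ j : Nat, o = (j : Int) + 1 :=
      ⟨(o - 1).toNat, by omega⟩
    have hjm : j + 1 < p.length := by omega
    have hjk : j < (((pvDiffs t).drop i').take (pvDiffs p).length).length := by
      simp only [List.length_take, List.length_drop, pvDiffs_length]; omega
    have := List.getElem_of_eq heq hjk
    rw [List.getElem_take, List.getElem_drop, pvDiffs_getElem, pvDiffs_getElem] at this
    exact (pvStep t p i' j hjm hub').mpr this

-- -- KMP spec machinery: pvFg p s b = largest m ≤ b with p.take m a suffix of s --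

def pvFg (p s : List Int) (b : Nat) : Nat := Nat.findGreatest (fun m => p.take m <:+ s) b

lemma pvFg_le (p s : List Int) (b : Nat) : pvFg p s b ≤ b := Nat.findGreatest_le b

lemma pvFg_suffix (p s : List Int) (b : Nat) : p.take (pvFg p s b) <:+ s :=
  Nat.findGreatest_spec (P := fun m => p.take m <:+ s) (Nat.zero_le b)
    (by exact List.nil_suffix)

lemma pvFg_max (p s : List Int) (b m : Nat) (hm : m ≤ b) (hs : p.take m <:+ s) :
    m ≤ pvFg p s b := Nat.le_findGreatest hm hs

lemma pvSufSuf (xs ys zs : List Int) (h1 : xs <:+ zs) (h2 : ys <:+ zs)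
    (h : xs.length ≤ ys.length) : xs <:+ ys := by
  rw [← List.reverse_prefix] at *
  exact List.prefix_of_prefix_length_le h1 h2 (by simpa)

lemma pvTakeSucc (p : List Int) (m : Nat) (h : m < p.length) :
    p.take (m + 1) = p.take m ++ [p.getD m 0] := by
  rw [List.take_add_one, List.getElem?_eq_getElem h, List.getD_eq_getElem p 0 h]
  rfl

lemma pvExtend (p s : List Int) (d : Int) (m : Nat) (hm : m < p.length)
    (hs : p.take m <:+ s) (hd : d = p.getD m 0) : p.take (m + 1) <:+ s ++ [d] := by
  rw [pvTakeSucc p m hm, ← hd]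
  obtain ⟨u, rfl⟩ := hs
  exact ⟨u, by simp⟩

lemma pvShrink (p s : List Int) (d : Int) (m : Nat) (h1 : 1 ≤ m) (h2 : m ≤ p.length)
    (hs : p.take m <:+ s ++ [d]) : p.take (m - 1) <:+ s ∧ p.getD (m - 1) 0 = d := by
  have hm : m - 1 + 1 = m := by omega
  rw [← hm, pvTakeSucc p (m-1) (by omega)] at hs
  obtain ⟨u, hu⟩ := hs
  rw [← List.append_assoc] at hu
  obtain ⟨hu1, hu2⟩ := List.append_inj' hu (by simp)
  refine ⟨⟨u, hu1⟩, by simpa [List.getD] using hu2⟩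

lemma pvFg_nil (p : List Int) (b : Nat) (hb : b ≤ p.length) : pvFg p [] b = 0 := by
  unfold pvFg
  rw [Nat.findGreatest_eq_iff]
  refine ⟨Nat.zero_le b, fun h => absurd rfl h, fun n hn hnb hP => ?_⟩
  have := List.IsSuffix.length_le hP
  simp only [List.length_take, List.length_nil] at this
  omega

lemma pvFg_congr (p s1 s2 : List Int) (b : Nat)
    (h : ∀ m, 0 < m → m ≤ b → (p.take m <:+ s1 ↔ p.take m <:+ s2)) :
    pvFg p s1 b = pvFg p s2 b := by
  induction b with
  | zero => rfl
  | succ b ih =>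
    unfold pvFg
    rw [Nat.findGreatest_succ, Nat.findGreatest_succ]
    by_cases hb : p.take (b+1) <:+ s1
    · rw [if_pos hb, if_pos ((h (b+1) (by omega) le_rfl).mp hb)]
    · rw [if_neg hb, if_neg (fun hc => hb ((h (b+1) (by omega) le_rfl).mpr hc))]
      exact ih (fun m h0 hm => h m h0 (by omega))

-- the while loop: descends the failure chain to the longest extendable border
lemma pvWhileB_spec (p : List Int) (fail : List Nat) (d : Int) (s : List Int) :
    ∀ (fuel q0 : Nat), q0 ≤ fuel → q0 < p.length → p.take q0 <:+ s →
    (∀ i, i < q0 → fail.getD i 0 = pvFg p (p.take (i+1)) i) →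
    pvWhileB p fail d fuel q0 ≤ q0 ∧
    p.take (pvWhileB p fail d fuel q0) <:+ s ∧
    (d = p.getD (pvWhileB p fail d fuel q0) 0 ∨ pvWhileB p fail d fuel q0 = 0) ∧
    (∀ m, m ≤ q0 → p.take m <:+ s → d = p.getD m 0 → m ≤ pvWhileB p fail d fuel q0) := by
  intro fuel
  induction fuel with
  | zero =>
    intro q0 hq0 _ hsuf _
    have : q0 = 0 := by omega
    subst this
    exact ⟨le_rfl, hsuf, Or.inr rfl, fun m hm _ _ => hm⟩
  | succ fuel ih =>
    intro q0 hq0 hlt hsuf hfail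
    by_cases hc : 0 < q0 ∧ d ≠ p.getD q0 0
    · have hrec : pvWhileB p fail d (fuel+1) q0 = pvWhileB p fail d fuel (fail.getD (q0-1) 0) := by
        simp only [pvWhileB, if_pos hc]
      have hfq : fail.getD (q0-1) 0 = pvFg p (p.take q0) (q0-1) := by
        have := hfail (q0-1) (by omega)
        rwa [show q0 - 1 + 1 = q0 by omega] at this
      set q0' := fail.getD (q0-1) 0 with hq0'
      have hle' : q0' ≤ q0 - 1 := by rw [hfq]; exact pvFg_le _ _ _
      have hsuf' : p.take q0' <:+ p.take q0 := by rw [hfq]; exact pvFg_suffix _ _ _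
      have hsufs : p.take q0' <:+ s := hsuf'.trans hsuf
      obtain ⟨ih1, ih2, ih3, ih4⟩ := ih q0' (by omega) (by omega) hsufs
        (fun i hi => hfail i (by omega))
      rw [hrec]
      refine ⟨by omega, ih2, ih3, fun m hm hms hmd => ?_⟩
      have hmne : m ≠ q0 := by
        intro e; subst e; exact hc.2 hmd
      have hmlt : m ≤ q0 - 1 := by omega
      have hmsuf : p.take m <:+ p.take q0 := by
        apply pvSufSuf _ _ _ hms hsuf
        simp only [List.length_take]
        omega
      exact ih4 m (by rw [hfq]; exact pvFg_max _ _ _ _ hmlt hmsuf) hms hmd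
    · have hrec : pvWhileB p fail d (fuel+1) q0 = q0 := by
        simp only [pvWhileB, if_neg hc]
      rw [hrec]
      refine ⟨le_rfl, hsuf, ?_, fun m hm _ _ => hm⟩
      by_cases h0 : q0 = 0
      · exact Or.inr h0
      · push_neg at hc
        exact Or.inl (hc (by omega))

-- one matcher step: from the longest border bounded by b to the one bounded by b+1
lemma pvStepB_spec (p : List Int) (fail : List Nat) (s : List Int) (d : Int) (b : Nat)
    (hb : b < p.length)
    (hfail : ∀ i, i < b → fail.getD i 0 = pvFg p (p.take (i+1)) i) :
    pvStepB p fail d (pvFg p s b) = pvFg p (s ++ [d]) (b+1) := by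
  set q0 := pvFg p s b with hq0def
  have hq0b : q0 ≤ b := pvFg_le _ _ _
  obtain ⟨w1, w2, w3, w4⟩ := pvWhileB_spec p fail d s q0 q0 le_rfl (by omega)
    (pvFg_suffix _ _ _) (fun i hi => hfail i (by omega))
  set r := pvWhileB p fail d q0 q0 with hrdef
  have hstep : pvStepB p fail d q0 = if d = p.getD r 0 then r + 1 else r := rfl
  by_cases hd : d = p.getD r 0
  · rw [hstep, if_pos hd]
    apply le_antisymm
    · exact pvFg_max _ _ _ _ (by omega) (pvExtend p s d r (by omega) w2 hd)
    · set m := pvFg p (s ++ [d]) (b+1) with hmdef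
      have hmb : m ≤ b + 1 := pvFg_le _ _ _
      have hmsuf : p.take m <:+ s ++ [d] := pvFg_suffix _ _ _
      by_cases hm0 : m = 0
      · omega
      · obtain ⟨hs1, hs2⟩ := pvShrink p s d m (by omega) (by omega) hmsuf
        have : m - 1 ≤ r := w4 (m-1) (pvFg_max _ _ _ _ (by omega) hs1) hs1 hs2.symm
        omega
  · rw [hstep, if_neg hd]
    have hr0 : r = 0 := by
      rcases w3 with h | h
      · exact absurd h hd
      · exact h
    rw [hr0]
    symm
    set m := pvFg p (s ++ [d]) (b+1) with hmdef
    by_contra hm0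
    have hmb : m ≤ b + 1 := pvFg_le _ _ _
    have hmsuf : p.take m <:+ s ++ [d] := pvFg_suffix _ _ _
    obtain ⟨hs1, hs2⟩ := pvShrink p s d m (by omega) (by omega) hmsuf
    have hmr : m - 1 ≤ r := w4 (m-1) (pvFg_max _ _ _ _ (by omega) hs1) hs1 hs2.symm
    rw [hr0] at hmr
    have h1 : m - 1 = 0 := by omega
    rw [h1] at hs2
    rw [hr0] at hd
    exact hd hs2.symm

-- the failure table: fail[i] is the longest proper border of p.take (i+1)
lemma pvBuildFail_aux (p : List Int) (hp : 0 < p.length) :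
    ∀ t, t ≤ p.length - 1 →
    ((List.range' 1 t).foldl
      (fun st j => ((st.1.set j (pvStepB p st.1 (p.getD j 0) st.2)),
                    pvStepB p st.1 (p.getD j 0) st.2))
      (List.replicate p.length 0, 0)).1.length = p.length ∧
    (∀ i, i ≤ t →
      ((List.range' 1 t).foldl
        (fun st j => ((st.1.set j (pvStepB p st.1 (p.getD j 0) st.2)),
                      pvStepB p st.1 (p.getD j 0) st.2))
        (List.replicate p.length 0, 0)).1.getD i 0 = pvFg p (p.take (i+1)) i) ∧
    ((List.range' 1 t).foldl
      (fun st j => ((st.1.set j (pvStepB p st.1 (p.getD j 0) st.2)),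
                    pvStepB p st.1 (p.getD j 0) st.2))
      (List.replicate p.length 0, 0)).2 = pvFg p (p.take (t+1)) t := by
  intro t
  induction t with
  | zero =>
    intro _
    refine ⟨by simp, fun i hi => ?_, rfl⟩
    have : i = 0 := by omega
    subst this
    simp [List.getD, List.getElem?_replicate, hp, pvFg]
  | succ t ih =>
    intro ht
    obtain ⟨ih1, ih2, ih3⟩ := ih (by omega)
    have hsplit : List.range' 1 (t+1) = List.range' 1 t ++ [1 + t] := by
      simpa using List.range'_concat (step := 1) (s := 1) (n := t)
    rw [hsplit, List.foldl_append]
    set st := (List.range' 1 t).foldl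
      (fun st j => ((st.1.set j (pvStepB p st.1 (p.getD j 0) st.2)),
                    pvStepB p st.1 (p.getD j 0) st.2))
      (List.replicate p.length 0, 0) with hstdef
    simp only [List.foldl_cons, List.foldl_nil]
    have hd1t : (1 + t) = t + 1 := by omega
    rw [hd1t]
    have hq1 : pvStepB p st.1 (p.getD (t+1) 0) st.2 = pvFg p (p.take (t+2)) (t+1) := by
      rw [ih3, pvStepB_spec p st.1 (p.take (t+1)) (p.getD (t+1) 0) t (by omega)
        (fun i hi => ih2 i (by omega))]
      rw [← pvTakeSucc p (t+1) (by omega)]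
    refine ⟨by simpa using ih1, fun i hi => ?_, by rw [hq1]⟩
    by_cases hit : i = t + 1
    · subst hit
      rw [List.getD, List.getElem?_set_self (by omega), Option.getD_some, hq1,
        show t + 1 + 1 = t + 2 by omega]
    · rw [List.getD, List.getElem?_set_ne (by omega), ← List.getD]
      exact ih2 i (by omega)

lemma pvBuildFail_spec (p : List Int) (hp : 0 < p.length) :
    ∀ i, i < p.length → (pvBuildFail p p.length).1.getD i 0 = pvFg p (p.take (i+1)) i := by
  intro i hi
  have := (pvBuildFail_aux p hp (p.length - 1) le_rfl).2.1 i (by omega)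
  simpa [pvBuildFail] using this

-- -- the scanner: one left-to-right pass collecting every full match --

-- matches that end within the first j text characters, as the port prints them
def pvSpecList (dp dt : List Int) (start : Int) (j : Nat) : List String :=
  ((List.range j).filter (fun (j' : Nat) => decide (dp <:+ dt.take (j'+1))
      && decide (start ≤ (j' : Int) - (dp.length : Int) + 1))).map
    (fun (j' : Nat) => PySem.Int.toStr ((j' : Int) - (dp.length : Int) + 2))

lemma pvScan_aux (dp dt : List Int) (start : Int) (hp : 0 < dp.length) (fail : List Nat)
    (hfail : ∀ i, i < dp.length → fail.getD i 0 = pvFg dp (dp.take (i+1)) i) :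
    ∀ j, j ≤ dt.length →
    (PySem.List.enumerate (dt.take j) 0).foldl
      (fun st jd =>
        if pvStepB dp fail jd.2 st.2 = dp.length then
          (if start ≤ jd.1 - (dp.length : Int) + 1
             then st.1 ++ [PySem.Int.toStr (jd.1 - (dp.length : Int) + 2)] else st.1,
           fail.getD (dp.length - 1) 0)
        else (st.1, pvStepB dp fail jd.2 st.2))
      ([], 0)
    = (pvSpecList dp dt start j, pvFg dp (dt.take j) (dp.length - 1)) := by
  intro j
  induction j with
  | zero =>
    intro _
    simp only [List.take_zero, PySem.List.enumerate_nil, List.foldl_nil, pvSpecList,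
      List.range_zero, List.filter_nil, List.map_nil]
    rw [pvFg_nil dp (dp.length - 1) (by omega)]
  | succ j ih =>
    intro hj
    have hjlt : j < dt.length := by omega
    have htake : dt.take (j+1) = dt.take j ++ [dt.getD j 0] := pvTakeSucc dt j hjlt
    have hlen : ((dt.take j).length : Int) = (j : Int) := by
      simp only [List.length_take]; omega
    rw [htake, PySem.List.enumerate_append, List.foldl_append, ih (by omega),
      PySem.List.enumerate_cons, PySem.List.enumerate_nil, List.foldl_cons, List.foldl_nil]
    have hq1 : pvStepB dp fail (dt.getD j 0) (pvFg dp (dt.take j) (dp.length - 1))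
        = pvFg dp (dt.take (j+1)) dp.length := by
      rw [pvStepB_spec dp fail (dt.take j) (dt.getD j 0) (dp.length - 1) (by omega)
        (fun i hi => hfail i (by omega)), ← htake,
        show dp.length - 1 + 1 = dp.length by omega]
    have hmatch : pvFg dp (dt.take (j+1)) dp.length = dp.length ↔ dp <:+ dt.take (j+1) := by
      constructor
      · intro h
        have := pvFg_suffix dp (dt.take (j+1)) dp.length
        rwa [h, List.take_length] at this
      · intro h
        refine le_antisymm (pvFg_le _ _ _) (pvFg_max _ _ _ _ le_rfl ?_)
        rwa [List.take_length]
    have hsplit : pvSpecList dp dt start (j+1)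
        = pvSpecList dp dt start j
          ++ (if (decide (dp <:+ dt.take (j+1))
                && decide (start ≤ (j : Int) - (dp.length : Int) + 1))
              then [PySem.Int.toStr ((j : Int) - (dp.length : Int) + 2)] else []) := by
      unfold pvSpecList
      rw [List.range_succ, List.filter_append, List.map_append]
      congr 1
      simp only [List.filter_cons, List.filter_nil]
      by_cases hb : (decide (dp <:+ dt.take (j+1))
          && decide (start ≤ (j : Int) - (dp.length : Int) + 1)) = true
      · simp [hb]
      · have hb' : (decide (dp <:+ dt.take (j+1))
            && decide (start ≤ (j : Int) - (dp.length : Int) + 1)) = false := by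
          simpa using hb
        simp [hb']
    simp only [hq1, hlen, Int.zero_add]
    by_cases hq : pvFg dp (dt.take (j+1)) dp.length = dp.length
    · rw [if_pos hq]
      have hsuf : dp <:+ dt.take (j+1) := hmatch.mp hq
      have hqnew : fail.getD (dp.length - 1) 0 = pvFg dp (dt.take (j+1)) (dp.length - 1) := by
        rw [hfail (dp.length - 1) (by omega), show dp.length - 1 + 1 = dp.length by omega,
          List.take_length]
        apply pvFg_congr
        intro m h0 hm
        constructor
        · intro h
          exact h.trans hsuf
        · intro h
          apply pvSufSuf _ _ _ h hsuf
          simp only [List.length_take]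
          omega
      rw [hsplit, hqnew, (decide_eq_true_iff).mpr hsuf, ← htake]
      by_cases hst : start ≤ (j : Int) - (dp.length : Int) + 1
      · rw [if_pos hst, (decide_eq_true_iff).mpr hst]
        simp
      · rw [if_neg hst, decide_eq_false hst]
        simp
    · rw [if_neg hq]
      have hqeq : pvFg dp (dt.take (j+1)) dp.length = pvFg dp (dt.take (j+1)) (dp.length - 1) := by
        have hstep := Nat.findGreatest_succ (P := fun m => dp.take m <:+ dt.take (j+1))
          (dp.length - 1)
        rw [show dp.length - 1 + 1 = dp.length by omega] at hstep
        unfold pvFg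
        rw [hstep, if_neg]
        intro hc
        rw [List.take_length] at hc
        exact hq (hmatch.mpr hc)
      have hnosuf : ¬ dp <:+ dt.take (j+1) := fun hc => hq (hmatch.mpr hc)
      rw [hsplit, hqeq, decide_eq_false hnosuf, ← htake]
      simp

-- converting matches indexed by end position to A's start-position enumeration
lemma pvSufSlice (dp dt : List Int) (i0 : Nat) (h : i0 + dp.length ≤ dt.length) :
    (dp <:+ dt.take (i0 + dp.length)) ↔ (dt.drop i0).take dp.length = dp := by
  rw [List.suffix_iff_eq_drop]
  have hlen : (dt.take (i0 + dp.length)).length = i0 + dp.length := by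
    simp only [List.length_take]
    omega
  rw [hlen, show i0 + dp.length - dp.length = i0 by omega, List.drop_take,
    show i0 + dp.length - i0 = dp.length by omega]
  exact eq_comm

lemma pvListsEq (dp dt : List Int) (start : Int) (hstart : 0 ≤ start) (hk : 0 < dp.length) :
    pvSpecList dp dt start dt.length =
    ((PySem.List.pyRange start ((dt.length : Int) - (dp.length : Int) + 1) 1).filter
      (fun i => PySem.List.slice dt (some i) (some (i + (dp.length : Int))) == dp)).map
      (fun i => PySem.Int.toStr (i + 1)) := by
  have hsc : ((start.toNat : Nat) : Int) = start := Int.toNat_of_nonneg hstart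
  rw [PySem.List.pyRange_one, List.filter_map, List.map_map]
  unfold pvSpecList
  by_cases hc : dt.length ≤ start.toNat + (dp.length - 1)
  · have hM : (((dt.length : Int) - (dp.length : Int) + 1) - start).toNat = 0 := by omega
    rw [hM]
    have hnil : (List.range dt.length).filter
        (fun j' => decide (dp <:+ dt.take (j'+1))
          && decide (start ≤ (j' : Int) - (dp.length : Int) + 1)) = [] := by
      rw [List.filter_eq_nil_iff]
      intro j' hmem
      have hj' := List.mem_range.mp hmem
      simp only [Bool.and_eq_true, decide_eq_true_eq, not_and]
      intro _ h2
      omega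
    rw [hnil]
    rfl
  · push_neg at hc
    have hsplitr : List.range dt.length
        = List.range (start.toNat + (dp.length - 1))
          ++ (List.range (dt.length - (start.toNat + (dp.length - 1)))).map
              ((start.toNat + (dp.length - 1)) + ·) := by
      rw [← List.range_add]
      congr 1
      omega
    rw [hsplitr, List.filter_append]
    have hnil : (List.range (start.toNat + (dp.length - 1))).filter
        (fun j' => decide (dp <:+ dt.take (j'+1))
          && decide (start ≤ (j' : Int) - (dp.length : Int) + 1)) = [] := by
      rw [List.filter_eq_nil_iff]
      intro j' hmem
      have hj' := List.mem_range.mp hmem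
      simp only [Bool.and_eq_true, decide_eq_true_eq, not_and]
      intro _ h2
      omega
    rw [hnil, List.nil_append, List.filter_map, List.map_map]
    have hM : (((dt.length : Int) - (dp.length : Int) + 1) - start).toNat
        = dt.length - (start.toNat + (dp.length - 1)) := by omega
    rw [hM]
    have hfilter : (List.range (dt.length - (start.toNat + (dp.length - 1)))).filter
          ((fun j' => decide (dp <:+ dt.take (j'+1))
            && decide (start ≤ (j' : Int) - (dp.length : Int) + 1))
           ∘ ((start.toNat + (dp.length - 1)) + ·))
        = (List.range (dt.length - (start.toNat + (dp.length - 1)))).filter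
          ((fun i => PySem.List.slice dt (some i) (some (i + (dp.length : Int))) == dp)
           ∘ (fun (k : Nat) => start + (k : Int))) := by
      apply List.filter_congr
      intro t' hmem
      have ht' := List.mem_range.mp hmem
      simp only [Function.comp_apply]
      have hi0 : start + (t' : Int) = ((start.toNat + t' : Nat) : Int) := by omega
      rw [hi0, PySem.List.slice_natCast_add]
      have hub : (start.toNat + t') + dp.length ≤ dt.length := by omega
      have hidx : start.toNat + (dp.length - 1) + t' + 1 = (start.toNat + t') + dp.length := by
        omega
      rw [Bool.eq_iff_iff]
      simp only [Bool.and_eq_true, decide_eq_true_eq, beq_iff_eq]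
      rw [hidx, pvSufSlice dp dt (start.toNat + t') hub]
      constructor
      · exact fun h => h.1
      · intro h
        exact ⟨h, by omega⟩
    rw [hfilter]
    apply List.map_congr_left
    intro t' hmem
    have ht' := List.mem_range.mp (List.mem_of_mem_filter hmem)
    simp only [Function.comp_apply]
    congr 1
    omega

-- A as a filter over its position range (reusing pvCore)
lemma pvA_char (t p : List Int) (start : Int) (hstart : 0 ≤ start)
    (h : ¬(t.length = 0 ∨ p.length = 0)) :
    find_pattern_positions t p start =
    PySem.Str.join " " (((PySem.List.pyRange start ((t.length : Int) - (p.length : Int) + 1) 1).filter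
      (fun i => PySem.List.slice (pvDiffs t) (some i) (some (i + ((pvDiffs p).length : Int)))
        == pvDiffs p)).map
      (fun i => PySem.Int.toStr (i + 1))) := by
  unfold find_pattern_positions
  rw [if_neg h]
  have key : List.filter
      (fun position => pvAInner t p position (PySem.List.pyRange 1 (p.length : Int) 1))
      (PySem.List.pyRange start ((t.length : Int) - (p.length : Int) + 1) 1)
    = List.filter
      (fun i => PySem.List.slice (pvDiffs t) (some i) (some (i + ((pvDiffs p).length : Int)))
        == pvDiffs p)
      (PySem.List.pyRange start ((t.length : Int) - (p.length : Int) + 1) 1) := by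
    apply List.filter_congr
    intro i hmem
    rw [PySem.List.mem_pyRange_one] at hmem
    have h1 : 0 ≤ i := le_trans hstart hmem.1
    have h2 : i + (p.length : Int) ≤ (t.length : Int) := by omega
    have hp : p ≠ [] := by
      intro hp
      exact h (Or.inr (by simp [hp]))
    exact pvCore t p i h1 h2 hp
  simp only [PySem.List.foldl_append_if, List.nil_append, List.map_map, key]
  rfl

-- ===== VERDICT (by name: the statement is the Claim_ definition above) =====
theorem find_pattern_positions_spec : Claim_equal_find_pattern_positions := by
  intro t p start _ hpre
  unfold Spec_find_pattern_positions
  by_cases h : t.length = 0 ∨ p.length = 0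
  · unfold find_pattern_positions find_pattern_positions_alt
    rw [if_pos h, if_pos h]
  · push_neg at h
    obtain ⟨ht0, hp0⟩ := h
    have h' : ¬(t.length = 0 ∨ p.length = 0) := by
      intro hc
      rcases hc with hc | hc
      · exact ht0 hc
      · exact hp0 hc
    rw [pvA_char t p start hpre h']
    simp only [find_pattern_positions_alt, if_neg h']
    by_cases hk : (pvDiffs p).length = 0
    · rw [if_pos hk]
      have hp1 : p.length = 1 := by
        have := pvDiffs_length p
        omega
      have hdp : pvDiffs p = [] := List.length_eq_zero_iff.mp hk
      have hbound : (t.length : Int) - (p.length : Int) + 1 = (t.length : Int) := by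
        rw [hp1]
        push_cast
        ring
      rw [hbound, hdp]
      simp only [List.length_nil, Nat.cast_zero, add_zero]
      have hfilter : (PySem.List.pyRange start (t.length : Int) 1).filter
          (fun i => PySem.List.slice (pvDiffs t) (some i) (some i) == ([] : List Int))
        = PySem.List.pyRange start (t.length : Int) 1 := by
        rw [List.filter_eq_self]
        intro i hmem
        rw [PySem.List.mem_pyRange_one] at hmem
        have h1 : 0 ≤ i := le_trans hpre hmem.1
        have hslice : PySem.List.slice (pvDiffs t) (some i) (some i) = [] := by
          rw [PySem.List.slice_toNat _ h1 h1]
          simp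
        rw [hslice]
        rfl
      rw [hfilter]
    · rw [if_neg hk]
      have hkpos : 0 < (pvDiffs p).length := by omega
      have hscan : (PySem.List.enumerate ((pvDiffs t).take (pvDiffs t).length) 0).foldl
          (fun st jd =>
            let q1 := pvStepB (pvDiffs p) (pvBuildFail (pvDiffs p) (pvDiffs p).length).1 jd.2 st.2
            if q1 = (pvDiffs p).length then
              (if start ≤ jd.1 - ((pvDiffs p).length : Int) + 1
                 then st.1 ++ [PySem.Int.toStr (jd.1 - ((pvDiffs p).length : Int) + 2)] else st.1,
               (pvBuildFail (pvDiffs p) (pvDiffs p).length).1.getD ((pvDiffs p).length - 1) 0)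
            else (st.1, q1))
          ([], 0)
          = (pvSpecList (pvDiffs p) (pvDiffs t) start (pvDiffs t).length,
             pvFg (pvDiffs p) ((pvDiffs t).take (pvDiffs t).length) ((pvDiffs p).length - 1)) := by
        exact pvScan_aux (pvDiffs p) (pvDiffs t) start hkpos
          (pvBuildFail (pvDiffs p) (pvDiffs p).length).1
          (pvBuildFail_spec (pvDiffs p) hkpos) (pvDiffs t).length le_rfl
      rw [List.take_length] at hscan
      unfold pvScan
      rw [hscan]
      have hbound : (t.length : Int) - (p.length : Int) + 1
          = ((pvDiffs t).length : Int) - ((pvDiffs p).length : Int) + 1 := by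
        have h1 := pvDiffs_length t
        have h2 := pvDiffs_length p
        omega
      rw [hbound]
      rw [pvListsEq (pvDiffs p) (pvDiffs t) start hpre hkpos]
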